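-- pv_equiv track=rewrite | github.com/gauravrana05/ProblemsDaily | gaurav/Python/Week_5/GrPA2.py | bin_fruits
-- ===== SOURCE A (Python) =====
-- def bin_fruits(fruit_prices):
--     '''
--     Classify the fruits as cheap, affordable and costly based on the fruit prices. Create a dictionary with the classification as keys and a set of fruits in that category.
--
--     cheap - less than 3 (not inclusive)
--     affordable - between 3 and 6 (both inclusive)
--     costly - greater than 6 (not inclusive)
--
--     Arguments:
--     fruit_prices: dict - dictionary with fruits as keys and prices as values
--
--     Return:
--     binned_fruits: dict - dictionary with category as key and a set of fruits in that category as values.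
--     '''
--
--     binned_fruits = {category:set() for category in ["cheap","affordable","costly"]}
--     for fruit, price in fruit_prices.items():
--         if price<3:
--             binned_fruits["cheap"].add(fruit)
--         elif 3<=price<=6:
--             binned_fruits["affordable"].add(fruit)
--         else:
--             binned_fruits["costly"].add(fruit)
--     return binned_fruits
-- ===== SOURCE B (Python) =====
-- def bin_fruits(fruit_prices):
--     items = fruit_prices.items()
--     return {
--         "cheap": {fruit for fruit, price in items if price < 3},
--         "affordable": {fruit for fruit, price in items if 3 <= price <= 6},
--         "costly": {fruit for fruit, price in items if price > 6},
--     }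
-- ===== Notes on version B (the rewrite author's own statement) =====
-- stated objective: simpler
-- what changed: Replaces the stateful dispatch loop that mutates three pre-created sets with three independent set comprehensions, one scan per category, assembled directly into the returned dict.
import Mathlib
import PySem

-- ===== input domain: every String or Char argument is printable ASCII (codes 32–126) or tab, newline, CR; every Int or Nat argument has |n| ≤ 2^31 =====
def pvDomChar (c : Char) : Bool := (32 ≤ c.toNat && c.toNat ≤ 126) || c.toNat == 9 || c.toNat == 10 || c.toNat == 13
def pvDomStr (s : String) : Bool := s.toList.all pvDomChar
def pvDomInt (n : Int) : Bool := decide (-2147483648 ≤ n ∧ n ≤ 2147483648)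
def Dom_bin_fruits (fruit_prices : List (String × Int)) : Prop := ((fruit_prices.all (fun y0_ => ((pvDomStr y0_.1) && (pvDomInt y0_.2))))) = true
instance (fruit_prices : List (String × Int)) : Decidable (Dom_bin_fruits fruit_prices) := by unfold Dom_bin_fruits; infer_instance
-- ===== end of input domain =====

-- B replaces A's stateful dispatch loop (three mutable sets filled by one pass) with three
-- independent per-category set comprehensions; same result, plainer decomposition.


-- ===== PORT A =====
-- binned_fruits = {category: set() for category in ["cheap","affordable","costly"]}
-- then one loop over fruit_prices.items() mutating the set behind the matching key
-- (binned_fruits[k].add(fruit) = Dict.modify k; the key always exists, so default [] is never used).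
def bin_fruits (fruit_prices : List (String × Int)) : List (String × List String) :=
  let binned : PySem.Dict String (PySem.Set String) :=
    ((PySem.Dict.empty.insert "cheap" PySem.Set.empty).insert "affordable" PySem.Set.empty).insert "costly" PySem.Set.empty
  let binned := fruit_prices.foldl (fun d fp =>
    if fp.2 < 3 then d.modify "cheap" [] (fun s => PySem.Set.add s fp.1)
    else if 3 ≤ fp.2 ∧ fp.2 ≤ 6 then d.modify "affordable" [] (fun s => PySem.Set.add s fp.1)
    else d.modify "costly" [] (fun s => PySem.Set.add s fp.1)) binned
  binned.items

-- ===== PORT B =====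
-- three set comprehensions, each its own scan of the items
def bin_fruits_alt (fruit_prices : List (String × Int)) : List (String × List String) :=
  [("cheap", PySem.Set.ofList ((fruit_prices.filter (fun fp => decide (fp.2 < 3))).map Prod.fst)),
   ("affordable", PySem.Set.ofList ((fruit_prices.filter (fun fp => decide (3 ≤ fp.2) && decide (fp.2 ≤ 6))).map Prod.fst)),
   ("costly", PySem.Set.ofList ((fruit_prices.filter (fun fp => decide (6 < fp.2))).map Prod.fst))]

-- ===== PRECONDITION & SPEC =====
def Spec_bin_fruits (fruit_prices : List (String × Int)) (out : List (String × List String)) : Prop := out = bin_fruits_alt fruit_prices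
instance (fruit_prices : List (String × Int)) (out : List (String × List String)) : Decidable (Spec_bin_fruits fruit_prices out) := by unfold Spec_bin_fruits; infer_instance

-- ===== CLAIM (what is proved, stated in full; the proofs are below) =====
def Claim_equal_bin_fruits : Prop := ∀ (fruit_prices : List (String × Int)), Dom_bin_fruits fruit_prices → Spec_bin_fruits fruit_prices (bin_fruits fruit_prices)

-- ===== LEMMAS AND PROOFS =====

-- A's loop, started from the three-key dict with arbitrary set contents, updates each bucket
-- with exactly the names whose price satisfies that bucket's condition.
lemma bin_fruits_loop (fps : List (String × Int)) (sc sa sco : PySem.Set String) :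
    fps.foldl (fun d fp =>
        if fp.2 < 3 then d.modify "cheap" [] (fun s => PySem.Set.add s fp.1)
        else if 3 ≤ fp.2 ∧ fp.2 ≤ 6 then d.modify "affordable" [] (fun s => PySem.Set.add s fp.1)
        else d.modify "costly" [] (fun s => PySem.Set.add s fp.1))
      (PySem.Dict.mk [("cheap", sc), ("affordable", sa), ("costly", sco)]) =
    PySem.Dict.mk
      [("cheap", PySem.Set.update sc ((fps.filter (fun fp => decide (fp.2 < 3))).map Prod.fst)),
       ("affordable", PySem.Set.update sa ((fps.filter (fun fp => decide (3 ≤ fp.2) && decide (fp.2 ≤ 6))).map Prod.fst)),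
       ("costly", PySem.Set.update sco ((fps.filter (fun fp => decide (6 < fp.2))).map Prod.fst))] := by
  induction fps generalizing sc sa sco with
  | nil => simp [PySem.Set.update_nil]
  | cons fp t ih =>
    by_cases h1 : fp.2 < 3
    · simp only [List.foldl_cons, if_pos h1]
      have : (PySem.Dict.mk [("cheap", sc), ("affordable", sa), ("costly", sco)]).modify "cheap" []
          (fun s => PySem.Set.add s fp.1) =
          PySem.Dict.mk [("cheap", PySem.Set.add sc fp.1), ("affordable", sa), ("costly", sco)] := by
        simp [PySem.Dict.modify, PySem.Dict.contains, PySem.Dict.insert, PySem.Dict.getD, PySem.Dict.get?]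
      rw [this, ih]
      have h2 : ¬ (3 ≤ fp.2) := by omega
      have h3 : ¬ (6 < fp.2) := by omega
      simp [h1, h2, h3, PySem.Set.update_cons]
    · by_cases h2 : 3 ≤ fp.2 ∧ fp.2 ≤ 6
      · simp only [List.foldl_cons, if_neg h1, if_pos h2]
        have : (PySem.Dict.mk [("cheap", sc), ("affordable", sa), ("costly", sco)]).modify "affordable" []
            (fun s => PySem.Set.add s fp.1) =
            PySem.Dict.mk [("cheap", sc), ("affordable", PySem.Set.add sa fp.1), ("costly", sco)] := by
          simp [PySem.Dict.modify, PySem.Dict.contains, PySem.Dict.insert, PySem.Dict.getD, PySem.Dict.get?]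
        rw [this, ih]
        have h3 : ¬ (6 < fp.2) := by omega
        simp [h1, h2.1, h2.2, h3, PySem.Set.update_cons]
      · simp only [List.foldl_cons, if_neg h1, if_neg h2]
        have : (PySem.Dict.mk [("cheap", sc), ("affordable", sa), ("costly", sco)]).modify "costly" []
            (fun s => PySem.Set.add s fp.1) =
            PySem.Dict.mk [("cheap", sc), ("affordable", sa), ("costly", PySem.Set.add sco fp.1)] := by
          simp [PySem.Dict.modify, PySem.Dict.contains, PySem.Dict.insert, PySem.Dict.getD, PySem.Dict.get?]
        rw [this, ih]
        have h3 : 6 < fp.2 := by omega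
        have h4 : ¬ (fp.2 < 3) := h1
        have h5 : ¬ (fp.2 ≤ 6) := by omega
        simp [h3, h4, h5, PySem.Set.update_cons]

-- ===== VERDICT (by name: the statement is the Claim_ definition above) =====
theorem bin_fruits_spec : Claim_equal_bin_fruits := by
  intro fps _
  unfold Spec_bin_fruits bin_fruits bin_fruits_alt
  have hinit : ((PySem.Dict.empty.insert "cheap" PySem.Set.empty).insert "affordable"
      PySem.Set.empty).insert "costly" PySem.Set.empty =
      PySem.Dict.mk [("cheap", (PySem.Set.empty : PySem.Set String)), ("affordable", PySem.Set.empty), ("costly", PySem.Set.empty)] := by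
    decide
  simp only [hinit, bin_fruits_loop, PySem.Set.update_empty]
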